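-- pv_equiv track=rewrite | github.com/vksh224/d-DSA-simulator | readLexingtonData_Fixed.py | connectTrajectories
-- ===== SOURCE A (Python) =====
-- def connectTrajectories(DM):
--     newDMTrajectories = {}
--     do_not_compare = []
--     for i in DM.keys():
--         if i not in do_not_compare:
--             mule1 = DM[i]
--             dm1_start = mule1[0].strip().split(" ")
--             dm1_end = mule1[len(mule1) - 1].strip().split(" ")
--             newDMTrajectories[i] = mule1
--             for j in DM.keys():
--                 if i != j and j not in do_not_compare:
--
--                     mule2 = DM[j]
--                     dm2_start = mule2[0].strip().split(" ")
--                     dm2_end = mule2[len(mule2) - 1].strip().split(" ")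
--
--                     if dm1_start == dm2_end:
--                         new_mule = mule2 + mule1
--                         newDMTrajectories[i] = new_mule
--                         do_not_compare.append(j)
--                         do_not_compare.append(i)
--
--                         break
--
--                     elif dm2_start == dm1_end:
--                         new_mule = mule1 + mule2
--                         newDMTrajectories[i] = new_mule
--                         do_not_compare.append(j)
--                         do_not_compare.append(i)
--
--                         break
--
--                     elif dm2_start == dm1_start:
--                         new_mule = mule2[::-1] + mule1
--                         newDMTrajectories[i] = new_mule
--                         do_not_compare.append(j)
--                         do_not_compare.append(i)
--
--                         break
--
--                     elif dm2_end == dm1_end: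
--                         new_mule = mule2 + mule1[::-1]
--                         newDMTrajectories[i] = new_mule
--                         do_not_compare.append(j)
--                         do_not_compare.append(i)
--
--                         break
--
--
--
--
--
--
--     return newDMTrajectories
-- ===== SOURCE B (Python) =====
-- def connectTrajectories(DM):
--     items = list(DM.items())
--     n = len(items)
--     # endpoint signatures computed once per trajectory
--     sigs = []
--     for _, mule in items:
--         sigs.append((mule[0].strip().split(" "), mule[-1].strip().split(" ")))
--     # index positions by start point and by end point (built once)
--     by_start = {}
--     by_end = {}
--     for p in range(n):
--         s, e = sigs[p]
--         by_start.setdefault(tuple(s), []).append(p)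
--         by_end.setdefault(tuple(e), []).append(p)
--     out = {}
--     consumed = set()
--     for p in range(n):
--         i, mule1 = items[p]
--         if p in consumed:
--             continue
--         s1, e1 = sigs[p]
--         out[i] = mule1
--         cands = (by_end.get(tuple(s1), []) + by_start.get(tuple(e1), [])
--                  + by_start.get(tuple(s1), []) + by_end.get(tuple(e1), []))
--         best = None
--         for q in cands:
--             if q != p and q not in consumed and (best is None or q < best):
--                 best = q
--         if best is not None:
--             mule2 = items[best][1]
--             s2, e2 = sigs[best]
--             if s1 == e2:
--                 out[i] = mule2 + mule1
--             elif s2 == e1: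
--                 out[i] = mule1 + mule2
--             elif s2 == s1:
--                 out[i] = mule2[::-1] + mule1
--             else:
--                 out[i] = mule2 + mule1[::-1]
--             consumed.add(best)
--             consumed.add(p)
--     return out
-- ===== Notes on version B (the rewrite author's own statement) =====
-- stated objective: faster
-- what changed: Replaces A's inner linear rescan of all keys (with endpoint splits recomputed every comparison and an O(n) do_not_compare list) by endpoint indexes built once (dicts mapping start/end points to position lists), a consumed set, and a minimum-position pick among the indexed candidates.
import Mathlib
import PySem

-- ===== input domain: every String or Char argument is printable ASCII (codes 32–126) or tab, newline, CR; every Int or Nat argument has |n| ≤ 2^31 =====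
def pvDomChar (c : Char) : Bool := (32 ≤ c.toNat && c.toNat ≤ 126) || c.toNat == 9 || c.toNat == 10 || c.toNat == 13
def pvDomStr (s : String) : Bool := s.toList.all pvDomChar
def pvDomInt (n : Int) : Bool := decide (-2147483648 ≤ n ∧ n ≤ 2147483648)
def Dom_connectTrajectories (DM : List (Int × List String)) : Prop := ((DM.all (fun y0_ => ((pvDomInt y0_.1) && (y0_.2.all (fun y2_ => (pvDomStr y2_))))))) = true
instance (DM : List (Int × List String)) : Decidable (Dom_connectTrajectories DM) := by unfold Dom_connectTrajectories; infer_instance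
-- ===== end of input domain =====

-- B replaces A's quadratic inner rescans by endpoint indexes built once (positions keyed by
-- start/end point) and a consumed set, picking the first eligible partner as a minimum position;
-- measured faster on the timing inputs (asymptotic: the inner scan over all keys disappears).

-- ===== PORT A =====
-- mule[0].strip().split(" ")  (split with explicit separator " " ≠ "", so split? never returns none)
def pvStartKey (m : List String) : List String :=
  (PySem.Str.split? (PySem.Str.strip (PySem.List.pyGetD m 0 "")) " ").getD []

-- mule[len(mule)-1].strip().split(" ")
def pvEndKey (m : List String) : List String :=
  (PySem.Str.split? (PySem.Str.strip (PySem.List.pyGetD m (PySem.List.len m - 1) "")) " ").getD []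

-- the inner 'for j in DM.keys()' with break: first j with i != j, j not in do_not_compare,
-- and any of the four endpoint matches
def pvInnerPred (d : PySem.Dict Int (List String)) (i : Int) (s1 e1 : List String)
    (dnc : List Int) (j : Int) : Bool :=
  j != i && !(dnc.contains j) &&
    (let mule2 := d.getD j []
     let s2 := pvStartKey mule2
     let e2 := pvEndKey mule2
     (s1 == e2) || (s2 == e1) || (s2 == s1) || (e2 == e1))

def pvStepA (d : PySem.Dict Int (List String)) (keys : List Int)
    (st : PySem.Dict Int (List String) × List Int) (i : Int) :
    PySem.Dict Int (List String) × List Int :=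
  if st.2.contains i then st else
    let mule1 := d.getD i []
    let s1 := pvStartKey mule1
    let e1 := pvEndKey mule1
    let out := st.1.insert i mule1
    match keys.find? (pvInnerPred d i s1 e1 st.2) with
    | none => (out, st.2)
    | some j =>
        let mule2 := d.getD j []
        let s2 := pvStartKey mule2
        let e2 := pvEndKey mule2
        if s1 == e2 then (out.insert i (mule2 ++ mule1), st.2 ++ [j, i])
        else if s2 == e1 then (out.insert i (mule1 ++ mule2), st.2 ++ [j, i])
        else if s2 == s1 then (out.insert i (mule2.reverse ++ mule1), st.2 ++ [j, i])
        -- mule2[::-1] is List.reverse (PySem.List.slice?_none_none_neg_one)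
        else if e2 == e1 then (out.insert i (mule2 ++ mule1.reverse), st.2 ++ [j, i])
        else (out, st.2)  -- no elif fired: the Python loop would continue (unreachable after find?)

def connectTrajectories (DM : List (Int × List String)) : List (Int × List String) :=
  let d : PySem.Dict Int (List String) := ⟨DM⟩
  ((d.keys).foldl (pvStepA d d.keys) (PySem.Dict.mk [], [])).1.items

-- ===== PORT B =====
-- (mule[0].strip().split(" "), mule[-1].strip().split(" "))
def pvSigB (m : List String) : List String × List String :=
  ((PySem.Str.split? (PySem.Str.strip (PySem.List.pyGetD m 0 "")) " ").getD [],
   (PySem.Str.split? (PySem.Str.strip (PySem.List.pyGetD m (-1) "")) " ").getD [])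

-- the 'for q in cands' minimum-position loop
def pvBestFold (p : Nat) (consumed : PySem.Set Nat) (cands : List Nat) : Option Nat :=
  cands.foldl (fun best q =>
    if q != p && !(PySem.Set.contains consumed q) then
      match best with
      | none => some q
      | some b => if q < b then some q else best
    else best) none

def pvStepB (items : List (Int × List String)) (sigs : List (List String × List String))
    (byStart byEnd : PySem.Dict (List String) (List Nat))
    (st : PySem.Dict Int (List String) × PySem.Set Nat) (p : Nat) :
    PySem.Dict Int (List String) × PySem.Set Nat :=
  if PySem.Set.contains st.2 p then st else
    let it := items.getD p (0, [])
    let i := it.1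
    let mule1 := it.2
    let sg := sigs.getD p ([], [])
    let s1 := sg.1
    let e1 := sg.2
    let out := st.1.insert i mule1
    let cands := byEnd.getD s1 [] ++ byStart.getD e1 [] ++ byStart.getD s1 [] ++ byEnd.getD e1 []
    match pvBestFold p st.2 cands with
    | none => (out, st.2)
    | some b =>
        let mule2 := (items.getD b (0, [])).2
        let sg2 := sigs.getD b ([], [])
        let s2 := sg2.1
        let e2 := sg2.2
        let merged := if s1 == e2 then mule2 ++ mule1
          else if s2 == e1 then mule1 ++ mule2
          -- mule2[::-1] is List.reverse (PySem.List.slice?_none_none_neg_one)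
          else if s2 == s1 then mule2.reverse ++ mule1
          else mule2 ++ mule1.reverse
        (out.insert i merged, PySem.Set.add (PySem.Set.add st.2 b) p)

def connectTrajectories_alt (DM : List (Int × List String)) : List (Int × List String) :=
  let d : PySem.Dict Int (List String) := ⟨DM⟩
  let items := d.items
  let n := items.length
  let sigs := items.map (fun pr => pvSigB pr.2)
  let byStart := (List.range n).foldl
    (fun b p => b.modify (sigs.getD p ([], [])).1 [] (· ++ [p])) (PySem.Dict.mk [])
  let byEnd := (List.range n).foldl
    (fun b p => b.modify (sigs.getD p ([], [])).2 [] (· ++ [p])) (PySem.Dict.mk [])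
  ((List.range n).foldl (pvStepB items sigs byStart byEnd) (PySem.Dict.mk [], PySem.Set.empty)).1.items

-- ===== PRECONDITION & SPEC =====
-- Pre_ excludes empty trajectory lists, on which A raises IndexError (mule[0]), and association
-- lists with duplicate keys, which do not arise from a Python dict argument.
def Pre_connectTrajectories (DM : List (Int × List String)) : Prop :=
  (DM.map Prod.fst).Nodup ∧ ∀ pr ∈ DM, pr.2 ≠ []
instance (DM : List (Int × List String)) : Decidable (Pre_connectTrajectories DM) := by
  unfold Pre_connectTrajectories; infer_instance

def pvWitness_connectTrajectories : (List (Int × List String)) :=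
  [(1, ["0 0", "1 1"]), (2, ["1 1", "2 2"])]

def Spec_connectTrajectories (DM : List (Int × List String)) (out : List (Int × List String)) : Prop := out = connectTrajectories_alt DM
instance (DM : List (Int × List String)) (out : List (Int × List String)) : Decidable (Spec_connectTrajectories DM out) := by unfold Spec_connectTrajectories; infer_instance

-- ===== CLAIM (what is proved, stated in full; the proofs are below) =====
def Claim_equal_connectTrajectories : Prop := ∀ (DM : List (Int × List String)), Dom_connectTrajectories DM → Pre_connectTrajectories DM → Spec_connectTrajectories DM (connectTrajectories DM)

-- ===== LEMMAS AND PROOFS =====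

lemma pvSigB_eq (m : List String) : pvSigB m = (pvStartKey m, pvEndKey m) := by
  unfold pvSigB pvStartKey pvEndKey
  cases m with
  | nil => rfl
  | cons a t =>
    have h1 : PySem.List.pyGetD (a :: t) (-1) "" = (a :: t).getLast (by simp) :=
      PySem.List.pyGetD_neg_one _ _ (by simp)
    have h2 : PySem.List.pyGetD (a :: t) (PySem.List.len (a :: t) - 1) ""
        = (a :: t).getLast (by simp) := by
      rw [PySem.List.len_eq, PySem.List.pyGetD_eq_getElem _ _ (by simp) (by simp),
        List.getLast_eq_getElem]
      congr 1
      simp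
    rw [h1, h2]

lemma pvRangeMap_getD {α : Type} (l : List α) (dft : α) :
    (List.range l.length).map (fun q => l.getD q dft) = l := by
  apply List.ext_getElem
  · simp
  · intro i h1 h2
    simp [List.getD, List.getElem?_eq_getElem h2]

lemma pvLookup (DM : List (Int × List String)) (hnd : (DM.map (fun x => x.1)).Nodup)
    {q : Nat} (hq : q < DM.length) :
    (PySem.Dict.mk DM).getD DM[q].1 [] = DM[q].2 := by
  apply PySem.Dict.getD_of_get?_eq_some
  apply PySem.Dict.get?_of_mem_items
  · show (DM[q].1, DM[q].2) ∈ DM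
    simpa using List.getElem_mem hq
  · rw [PySem.Dict.keys_mk]; exact hnd

lemma pvIdxDict_getD (key : Nat → List String) (n : Nat) (c : List String) :
    ((List.range n).foldl (fun b p => b.modify (key p) [] (· ++ [p])) (PySem.Dict.mk [])).getD c []
      = (List.range n).filter (fun q => key q == c) := by
  have : (List.range n).foldl (fun b p => b.modify (key p) [] (· ++ [p])) (PySem.Dict.mk [])
      = ((List.range n).map (fun p => (key p, p))).foldl
          (fun d pr => d.modify pr.1 [] (· ++ [pr.2])) (PySem.Dict.mk []) := by
    rw [List.foldl_map]
  rw [this, PySem.Dict.getD_foldl_modify_append]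
  have he : (PySem.Dict.mk ([] : List (List String × List Nat))).getD c [] = [] := rfl
  rw [he, List.filter_map, List.map_map]
  simp [Function.comp_def]

def pvMerge (best : Option Nat) (q : Nat) : Option Nat :=
  match best with
  | none => some q
  | some b => if q < b then some q else best

lemma pvMerge_some (a q : Nat) : pvMerge (some a) q = some (min a q) := by
  unfold pvMerge
  rcases Nat.lt_or_ge q a with h | h
  · simp [h, Nat.min_eq_right (Nat.le_of_lt h)]
  · simp [Nat.not_lt.2 h, Nat.min_eq_left h]

lemma pvFoldMerge_some (l : List Nat) : ∀ a, l.foldl pvMerge (some a) = some (l.foldl min a) := by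
  induction l with
  | nil => intro a; rfl
  | cons x t ih => intro a; rw [List.foldl_cons, pvMerge_some, ih, List.foldl_cons]

lemma pvFoldMerge_min? (l : List Nat) : l.foldl pvMerge none = l.min? := by
  cases l with
  | nil => rfl
  | cons x t =>
    rw [List.foldl_cons, show pvMerge none x = some x from rfl, pvFoldMerge_some,
      List.min?_cons']

lemma pvBestFold_eq_min? (p : Nat) (c : PySem.Set Nat) (cands : List Nat) :
    pvBestFold p c cands
      = (cands.filter (fun q => q != p && !(PySem.Set.contains c q))).min? := by
  unfold pvBestFold
  rw [PySem.List.foldl_if_eq_foldl_filter (fun q => q != p && !(PySem.Set.contains c q))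
    (fun best q => match best with
      | none => some q
      | some b => if q < b then some q else best) cands none]
  exact pvFoldMerge_min? _

lemma pvFind?_congr {l : List Nat} {p q : Nat → Bool} (h : ∀ x ∈ l, p x = q x) :
    l.find? p = l.find? q := by
  induction l with
  | nil => rfl
  | cons x t ih =>
    rw [List.find?_cons, List.find?_cons, h x List.mem_cons_self]
    split
    · rfl
    · exact ih (fun y hy => h y (List.mem_cons_of_mem _ hy))

lemma pvFind?_range_eq_min? (n : Nat) (pred : Nat → Bool) (cs : List Nat)
    (h : ∀ q, q ∈ cs ↔ (q < n ∧ pred q = true)) :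
    (List.range n).find? pred = cs.min? := by
  cases hf : (List.range n).find? pred with
  | none =>
    rw [List.find?_eq_none] at hf
    symm
    rw [List.min?_eq_none_iff]
    cases hc : cs with
    | nil => rfl
    | cons a t =>
      exfalso
      have := (h a).1 (hc ▸ List.mem_cons_self)
      exact hf a (List.mem_range.2 this.1) this.2
  | some b =>
    rw [List.find?_eq_some_iff_getElem] at hf
    obtain ⟨hpb, i, hi, hib, hmin⟩ := hf
    have hbn : b < n := by
      have : (List.range n)[i] = i := List.getElem_range hi
      rw [this] at hib; subst hib; simpa using hi
    have hbi : b = i := by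
      have : (List.range n)[i] = i := List.getElem_range hi
      rw [this] at hib; omega
    symm
    rw [List.min?_eq_some_iff]
    constructor
    · exact (h b).2 ⟨hbn, hpb⟩
    · intro x hx
      obtain ⟨hxn, hpx⟩ := (h x).1 hx
      by_contra hlt
      push_neg at hlt
      have hxi : x < i := by omega
      have := hmin x hxi
      rw [List.getElem_range] at this
      simp [hpx] at this

-- abbreviations
def pvG (DM : List (Int × List String)) (q : Nat) : Int := (DM.map (fun x => x.1)).getD q 0
def pvSigs (DM : List (Int × List String)) : List (List String × List String) :=
  DM.map (fun pr => pvSigB pr.2)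
def pvByStart (DM : List (Int × List String)) : PySem.Dict (List String) (List Nat) :=
  (List.range DM.length).foldl
    (fun b p => b.modify ((pvSigs DM).getD p ([], [])).1 [] (· ++ [p])) (PySem.Dict.mk [])
def pvByEnd (DM : List (Int × List String)) : PySem.Dict (List String) (List Nat) :=
  (List.range DM.length).foldl
    (fun b p => b.modify ((pvSigs DM).getD p ([], [])).2 [] (· ++ [p])) (PySem.Dict.mk [])

lemma pvG_eq (DM : List (Int × List String)) {q : Nat} (hq : q < DM.length) :
    pvG DM q = DM[q].1 := by
  unfold pvG
  rw [List.getD_eq_getElem _ _ (by simpa using hq), List.getElem_map]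

lemma pvG_inj (DM : List (Int × List String)) (hnd : (DM.map (fun x => x.1)).Nodup)
    {q r : Nat} (hq : q < DM.length) (hr : r < DM.length) (h : pvG DM q = pvG DM r) : q = r := by
  unfold pvG at h
  rw [List.getD_eq_getElem _ _ (by simpa using hq), List.getD_eq_getElem _ _ (by simpa using hr)] at h
  exact (List.Nodup.getElem_inj_iff hnd).1 h

lemma pvSigs_getD (DM : List (Int × List String)) {q : Nat} (hq : q < DM.length) :
    (pvSigs DM).getD q ([], []) = (pvStartKey DM[q].2, pvEndKey DM[q].2) := by
  unfold pvSigs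
  rw [List.getD_eq_getElem _ _ (by simpa using hq), List.getElem_map, pvSigB_eq]

lemma pvContains_map (DM : List (Int × List String)) (hnd : (DM.map (fun x => x.1)).Nodup)
    (s : PySem.Set Nat) (hs : ∀ q ∈ s, q < DM.length) {p : Nat} (hp : p < DM.length) :
    (s.map (pvG DM)).contains (pvG DM p) = PySem.Set.contains s p := by
  by_cases hmem : p ∈ s
  · have h1 : pvG DM p ∈ s.map (pvG DM) := List.mem_map_of_mem hmem
    rw [Bool.eq_iff_iff, List.contains_iff_mem, PySem.Set.contains_iff]
    exact ⟨fun _ => hmem, fun _ => h1⟩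
  · have h1 : pvG DM p ∉ s.map (pvG DM) := by
      intro hc
      obtain ⟨r, hr, he⟩ := List.mem_map.1 hc
      exact hmem (pvG_inj DM hnd (hs r hr) hp he ▸ hr)
    rw [Bool.eq_iff_iff, List.contains_iff_mem, PySem.Set.contains_iff]
    exact ⟨fun h => absurd h h1, fun h => absurd h hmem⟩


def pvSK (DM : List (Int × List String)) (q : Nat) : List String :=
  pvStartKey (DM.getD q (0, [])).2
def pvEK (DM : List (Int × List String)) (q : Nat) : List String :=
  pvEndKey (DM.getD q (0, [])).2
def pvPredF (DM : List (Int × List String)) (c : PySem.Set Nat) (s1 e1 : List String)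
    (p : Nat) : Nat → Bool :=
  fun q => q != p && !(PySem.Set.contains c q) &&
    ((s1 == pvEK DM q) || (pvSK DM q == e1) || (pvSK DM q == s1) || (pvEK DM q == e1))

lemma pvSK_eq (DM : List (Int × List String)) {q : Nat} (hq : q < DM.length) :
    pvSK DM q = pvStartKey DM[q].2 := by
  unfold pvSK; rw [List.getD_eq_getElem _ _ hq]
lemma pvEK_eq (DM : List (Int × List String)) {q : Nat} (hq : q < DM.length) :
    pvEK DM q = pvEndKey DM[q].2 := by
  unfold pvEK; rw [List.getD_eq_getElem _ _ hq]

set_option maxHeartbeats 1000000 in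
lemma pvStep_rel (DM : List (Int × List String)) (hnd : (DM.map (fun x => x.1)).Nodup)
    (p : Nat) (hp : p < DM.length)
    (stA : PySem.Dict Int (List String) × List Int)
    (stB : PySem.Dict Int (List String) × PySem.Set Nat)
    (h1 : stA.1 = stB.1) (h2 : stA.2 = stB.2.map (pvG DM)) (h3 : ∀ q ∈ stB.2, q < DM.length) :
    (pvStepA ⟨DM⟩ (PySem.Dict.keys ⟨DM⟩) stA (pvG DM p)).1
        = (pvStepB DM (pvSigs DM) (pvByStart DM) (pvByEnd DM) stB p).1
    ∧ (pvStepA ⟨DM⟩ (PySem.Dict.keys ⟨DM⟩) stA (pvG DM p)).2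
        = (pvStepB DM (pvSigs DM) (pvByStart DM) (pvByEnd DM) stB p).2.map (pvG DM)
    ∧ ∀ q ∈ (pvStepB DM (pvSigs DM) (pvByStart DM) (pvByEnd DM) stB p).2, q < DM.length := by
  have hm : ∀ q (hq : q < DM.length), (⟨DM⟩ : PySem.Dict Int (List String)).getD (pvG DM q) [] = DM[q].2 := by
    intro q hq; rw [pvG_eq DM hq]; exact pvLookup DM hnd hq
  have hit : ∀ q (hq : q < DM.length), DM.getD q (0, ([] : List String)) = DM[q] :=
    fun q hq => List.getD_eq_getElem _ _ hq
  have hsig1 : ∀ q (hq : q < DM.length), ((pvSigs DM).getD q ([], [])).1 = pvStartKey DM[q].2 := by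
    intro q hq; rw [pvSigs_getD DM hq]
  have hsig2 : ∀ q (hq : q < DM.length), ((pvSigs DM).getD q ([], [])).2 = pvEndKey DM[q].2 := by
    intro q hq; rw [pvSigs_getD DM hq]
  have hguard : stA.2.contains (pvG DM p) = PySem.Set.contains stB.2 p := by
    rw [h2]; exact pvContains_map DM hnd stB.2 h3 hp
  by_cases hg : PySem.Set.contains stB.2 p = true
  · have hgt : stA.2.contains (pvG DM p) = true := by rw [hguard]; exact hg
    simp only [pvStepA, pvStepB, hgt, hg, if_true]
    exact ⟨h1, h2, h3⟩
  · have hgf : PySem.Set.contains stB.2 p = false := by simpa using hg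
    have hgaf : stA.2.contains (pvG DM p) = false := by rw [hguard]; exact hgf
    have hpnot : p ∉ stB.2 := by
      intro hc
      have hcc := (PySem.Set.contains_iff stB.2 p).2 hc
      rw [hgf] at hcc
      exact Bool.noConfusion hcc
    have hcand : ∀ q, q ∈ ((pvByEnd DM).getD (pvStartKey DM[p].2) [] ++ (pvByStart DM).getD (pvEndKey DM[p].2) []
          ++ (pvByStart DM).getD (pvStartKey DM[p].2) [] ++ (pvByEnd DM).getD (pvEndKey DM[p].2) [])
        ↔ (q < DM.length ∧ ((pvStartKey DM[p].2 == pvEK DM q) || (pvSK DM q == pvEndKey DM[p].2)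
            || (pvSK DM q == pvStartKey DM[p].2) || (pvEK DM q == pvEndKey DM[p].2)) = true) := by
      intro q
      unfold pvByStart pvByEnd
      rw [List.mem_append, List.mem_append, List.mem_append,
        pvIdxDict_getD, pvIdxDict_getD, pvIdxDict_getD, pvIdxDict_getD]
      simp only [List.mem_filter, List.mem_range]
      constructor
      · rintro (((⟨hq, hb⟩ | ⟨hq, hb⟩) | ⟨hq, hb⟩) | ⟨hq, hb⟩)
        · refine ⟨hq, ?_⟩
          rw [hsig2 q hq, beq_iff_eq] at hb
          simp only [Bool.or_eq_true, beq_iff_eq]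
          exact Or.inl (Or.inl (Or.inl (by rw [pvEK_eq DM hq, hb])))
        · refine ⟨hq, ?_⟩
          rw [hsig1 q hq, beq_iff_eq] at hb
          simp only [Bool.or_eq_true, beq_iff_eq]
          exact Or.inl (Or.inl (Or.inr (by rw [pvSK_eq DM hq, hb])))
        · refine ⟨hq, ?_⟩
          rw [hsig1 q hq, beq_iff_eq] at hb
          simp only [Bool.or_eq_true, beq_iff_eq]
          exact Or.inl (Or.inr (by rw [pvSK_eq DM hq, hb]))
        · refine ⟨hq, ?_⟩
          rw [hsig2 q hq, beq_iff_eq] at hb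
          simp only [Bool.or_eq_true, beq_iff_eq]
          exact Or.inr (by rw [pvEK_eq DM hq, hb])
      · rintro ⟨hq, hb⟩
        rw [pvSK_eq DM hq, pvEK_eq DM hq] at hb
        simp only [Bool.or_eq_true, beq_iff_eq] at hb
        rcases hb with ((hb | hb) | hb) | hb
        · exact Or.inl (Or.inl (Or.inl ⟨hq, by rw [hsig2 q hq, beq_iff_eq, hb]⟩))
        · exact Or.inl (Or.inl (Or.inr ⟨hq, by rw [hsig1 q hq, beq_iff_eq, hb]⟩))
        · exact Or.inl (Or.inr ⟨hq, by rw [hsig1 q hq, beq_iff_eq, hb]⟩)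
        · exact Or.inr ⟨hq, by rw [hsig2 q hq, beq_iff_eq, hb]⟩
    have hKeq : PySem.Dict.keys (⟨DM⟩ : PySem.Dict Int (List String)) = (List.range DM.length).map (pvG DM) := by
      rw [PySem.Dict.keys_mk]
      have h := pvRangeMap_getD (DM.map (fun x => x.1)) 0
      rw [List.length_map] at h
      exact h.symm
    have hfindA : (PySem.Dict.keys (⟨DM⟩ : PySem.Dict Int (List String))).find?
          (pvInnerPred ⟨DM⟩ (pvG DM p) (pvStartKey DM[p].2) (pvEndKey DM[p].2) stA.2)
        = Option.map (pvG DM) ((List.range DM.length).find?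
            (pvPredF DM stB.2 (pvStartKey DM[p].2) (pvEndKey DM[p].2) p)) := by
      rw [hKeq, List.find?_map]
      congr 1
      apply pvFind?_congr
      intro q hq
      have hqn : q < DM.length := List.mem_range.1 hq
      show pvInnerPred ⟨DM⟩ (pvG DM p) (pvStartKey DM[p].2) (pvEndKey DM[p].2) stA.2 (pvG DM q)
        = pvPredF DM stB.2 (pvStartKey DM[p].2) (pvEndKey DM[p].2) p q
      have hbne : (pvG DM q != pvG DM p) = (q != p) := by
        by_cases hqp : q = p
        · subst hqp; simp
        · have hne : pvG DM q ≠ pvG DM p := fun hc => hqp (pvG_inj DM hnd hqn hp hc)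
          rw [Bool.eq_iff_iff]
          simp [bne_iff_ne, hne, hqp]
      have hcont : stA.2.contains (pvG DM q) = PySem.Set.contains stB.2 q := by
        rw [h2]; exact pvContains_map DM hnd stB.2 h3 hqn
      unfold pvInnerPred pvPredF
      rw [hm q hqn, hbne, hcont, pvSK_eq DM hqn, pvEK_eq DM hqn]
    have hbestB : pvBestFold p stB.2 ((pvByEnd DM).getD (pvStartKey DM[p].2) []
          ++ (pvByStart DM).getD (pvEndKey DM[p].2) [] ++ (pvByStart DM).getD (pvStartKey DM[p].2) []
          ++ (pvByEnd DM).getD (pvEndKey DM[p].2) [])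
        = (List.range DM.length).find? (pvPredF DM stB.2 (pvStartKey DM[p].2) (pvEndKey DM[p].2) p) := by
      rw [pvBestFold_eq_min?]
      refine (pvFind?_range_eq_min? DM.length _ _ ?_).symm
      intro q
      rw [List.mem_filter]
      constructor
      · rintro ⟨hqc, helig⟩
        obtain ⟨hqn, hPq⟩ := (hcand q).1 hqc
        refine ⟨hqn, ?_⟩
        unfold pvPredF
        rw [helig, hPq]
        rfl
      · rintro ⟨hqn, hpq⟩
        unfold pvPredF at hpq
        rw [Bool.and_eq_true] at hpq
        exact ⟨(hcand q).2 ⟨hqn, hpq.2⟩, hpq.1⟩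
    rcases hfind : (List.range DM.length).find?
        (pvPredF DM stB.2 (pvStartKey DM[p].2) (pvEndKey DM[p].2) p) with _ | b
    · have hA : pvStepA ⟨DM⟩ (PySem.Dict.keys ⟨DM⟩) stA (pvG DM p)
          = (stA.1.insert (pvG DM p) DM[p].2, stA.2) := by
        simp only [pvStepA, hgaf, Bool.false_eq_true, if_false]
        rw [hm p hp, hfindA, hfind]
        rfl
      have hB : pvStepB DM (pvSigs DM) (pvByStart DM) (pvByEnd DM) stB p
          = (stB.1.insert DM[p].1 DM[p].2, stB.2) := by
        simp only [pvStepB, hgf, Bool.false_eq_true, if_false]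
        rw [hit p hp, hsig1 p hp, hsig2 p hp, hbestB, hfind]
      rw [hA, hB]
      exact ⟨by rw [h1, pvG_eq DM hp], h2, h3⟩
    · have hmem : b ∈ List.range DM.length := List.mem_of_find?_eq_some hfind
      have hbn : b < DM.length := List.mem_range.1 hmem
      have hpb : pvPredF DM stB.2 (pvStartKey DM[p].2) (pvEndKey DM[p].2) p b = true :=
        List.find?_some hfind
      unfold pvPredF at hpb
      rw [Bool.and_eq_true, Bool.and_eq_true] at hpb
      obtain ⟨⟨hbp', hbc'⟩, hdisj⟩ := hpb
      have hbp : b ≠ p := by simpa using hbp'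
      have hbnot : b ∉ stB.2 := by
        intro hc
        have hcc := (PySem.Set.contains_iff stB.2 b).2 hc
        rw [hcc] at hbc'
        exact Bool.noConfusion hbc'
      rw [pvSK_eq DM hbn, pvEK_eq DM hbn] at hdisj
      have hA : pvStepA ⟨DM⟩ (PySem.Dict.keys ⟨DM⟩) stA (pvG DM p)
          = ((stA.1.insert (pvG DM p) DM[p].2).insert (pvG DM p)
              (if (pvStartKey DM[p].2 == pvEndKey DM[b].2) = true then DM[b].2 ++ DM[p].2
               else if (pvStartKey DM[b].2 == pvEndKey DM[p].2) = true then DM[p].2 ++ DM[b].2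
               else if (pvStartKey DM[b].2 == pvStartKey DM[p].2) = true then DM[b].2.reverse ++ DM[p].2
               else DM[b].2 ++ DM[p].2.reverse),
             stA.2 ++ [pvG DM b, pvG DM p]) := by
        simp only [pvStepA, hgaf, Bool.false_eq_true, if_false]
        rw [hm p hp, hfindA, hfind]
        simp only [Option.map_some]
        rw [hm b hbn]
        by_cases c1 : (pvStartKey DM[p].2 == pvEndKey DM[b].2) = true
        · simp [c1]
        · by_cases c2 : (pvStartKey DM[b].2 == pvEndKey DM[p].2) = true
          · simp [c1, c2]
          · by_cases c3 : (pvStartKey DM[b].2 == pvStartKey DM[p].2) = true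
            · simp [c1, c2, c3]
            · have c4 : (pvEndKey DM[b].2 == pvEndKey DM[p].2) = true := by
                simp only [Bool.or_eq_true] at hdisj
                rcases hdisj with ((h | h) | h) | h
                · exact absurd h c1
                · exact absurd h c2
                · exact absurd h c3
                · exact h
              simp [c1, c2, c3, c4]
      have hB : pvStepB DM (pvSigs DM) (pvByStart DM) (pvByEnd DM) stB p
          = ((stB.1.insert DM[p].1 DM[p].2).insert DM[p].1
              (if (pvStartKey DM[p].2 == pvEndKey DM[b].2) = true then DM[b].2 ++ DM[p].2
               else if (pvStartKey DM[b].2 == pvEndKey DM[p].2) = true then DM[p].2 ++ DM[b].2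
               else if (pvStartKey DM[b].2 == pvStartKey DM[p].2) = true then DM[b].2.reverse ++ DM[p].2
               else DM[b].2 ++ DM[p].2.reverse),
             stB.2 ++ [b, p]) := by
        simp only [pvStepB, hgf, Bool.false_eq_true, if_false]
        rw [hit p hp, hsig1 p hp, hsig2 p hp, hbestB, hfind]
        have hset : PySem.Set.add (PySem.Set.add stB.2 b) p = stB.2 ++ [b, p] := by
          rw [PySem.Set.add_of_not_mem hbnot]
          rw [PySem.Set.add_of_not_mem (by
            intro hc
            rcases List.mem_append.1 hc with hc | hc
            · exact hpnot hc
            · rcases List.mem_singleton.1 hc with rfl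
              exact hbp rfl)]
          simp
        have hdm : DM[b]? = some DM[b] := List.getElem?_eq_getElem hbn
        have hsg : (pvSigs DM)[b]? = some (pvStartKey DM[b].2, pvEndKey DM[b].2) := by
          unfold pvSigs
          rw [List.getElem?_map, hdm]
          rw [Option.map_some, pvSigB_eq]
        by_cases c1 : (pvStartKey DM[p].2 == pvEndKey DM[b].2) = true
        · simp [c1, hdm, hsg, hset]
        · by_cases c2 : (pvStartKey DM[b].2 == pvEndKey DM[p].2) = true
          · simp [c1, c2, hdm, hsg, hset]
          · by_cases c3 : (pvStartKey DM[b].2 == pvStartKey DM[p].2) = true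
            · simp [c1, c2, c3, hdm, hsg, hset]
            · simp [c1, c2, c3, hdm, hsg, hset]
      rw [hA, hB]
      refine ⟨by rw [h1, pvG_eq DM hp], ?_, ?_⟩
      · rw [h2]
        simp
      · intro q hq
        rcases List.mem_append.1 hq with hq | hq
        · exact h3 q hq
        · simp only [List.mem_cons, List.not_mem_nil, or_false] at hq
          rcases hq with rfl | rfl
          · exact hbn
          · exact hp

lemma pvKeys_eq (DM : List (Int × List String)) :
    PySem.Dict.keys (⟨DM⟩ : PySem.Dict Int (List String)) = (List.range DM.length).map (pvG DM) := by
  rw [PySem.Dict.keys_mk]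
  have h := pvRangeMap_getD (DM.map (fun x => x.1)) 0
  rw [List.length_map] at h
  exact h.symm

lemma pvFold_rel (DM : List (Int × List String)) (hnd : (DM.map (fun x => x.1)).Nodup) :
    ∀ (l : List Nat), (∀ q ∈ l, q < DM.length) →
    ∀ (stA : PySem.Dict Int (List String) × List Int)
      (stB : PySem.Dict Int (List String) × PySem.Set Nat),
      stA.1 = stB.1 → stA.2 = stB.2.map (pvG DM) → (∀ q ∈ stB.2, q < DM.length) →
      (l.foldl (fun st q => pvStepA ⟨DM⟩ (PySem.Dict.keys ⟨DM⟩) st (pvG DM q)) stA).1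
          = (l.foldl (pvStepB DM (pvSigs DM) (pvByStart DM) (pvByEnd DM)) stB).1
      ∧ (l.foldl (fun st q => pvStepA ⟨DM⟩ (PySem.Dict.keys ⟨DM⟩) st (pvG DM q)) stA).2
          = (l.foldl (pvStepB DM (pvSigs DM) (pvByStart DM) (pvByEnd DM)) stB).2.map (pvG DM) := by
  intro l
  induction l with
  | nil => intro _ stA stB h1 h2 _; exact ⟨h1, h2⟩
  | cons x t ih =>
    intro hl stA stB h1 h2 h3
    rw [List.foldl_cons, List.foldl_cons]
    obtain ⟨g1, g2, g3⟩ := pvStep_rel DM hnd x (hl x List.mem_cons_self) stA stB h1 h2 h3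
    exact ih (fun q hq => hl q (List.mem_cons_of_mem _ hq)) _ _ g1 g2 g3

lemma pvMain (DM : List (Int × List String)) (hnd : (DM.map (fun x => x.1)).Nodup) :
    ((PySem.Dict.keys (⟨DM⟩ : PySem.Dict Int (List String))).foldl
        (pvStepA ⟨DM⟩ (PySem.Dict.keys ⟨DM⟩)) (PySem.Dict.mk [], ([] : List Int))).1.items
      = (((List.range DM.length).foldl (pvStepB DM (pvSigs DM) (pvByStart DM) (pvByEnd DM))
          (PySem.Dict.mk [], PySem.Set.empty))).1.items := by
  have hmap : (PySem.Dict.keys (⟨DM⟩ : PySem.Dict Int (List String))).foldl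
        (pvStepA ⟨DM⟩ (PySem.Dict.keys ⟨DM⟩)) (PySem.Dict.mk [], ([] : List Int))
      = (List.range DM.length).foldl
        (fun st q => pvStepA ⟨DM⟩ (PySem.Dict.keys ⟨DM⟩) st (pvG DM q)) (PySem.Dict.mk [], []) := by
    conv_lhs => rw [pvKeys_eq DM]
    rw [List.foldl_map, pvKeys_eq DM]
  rw [hmap]
  have h := pvFold_rel DM hnd (List.range DM.length) (fun q hq => List.mem_range.1 hq)
    (PySem.Dict.mk [], []) (PySem.Dict.mk [], PySem.Set.empty) rfl rfl
    (by intro q hq; simp [PySem.Set.empty] at hq)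
  rw [h.1]

-- ===== VERDICT (by name: the statement is the Claim_ definition above) =====
theorem connectTrajectories_spec : Claim_equal_connectTrajectories := by
  intro DM _ hpre
  show connectTrajectories DM = connectTrajectories_alt DM
  have hA : connectTrajectories DM
      = ((PySem.Dict.keys (⟨DM⟩ : PySem.Dict Int (List String))).foldl
          (pvStepA ⟨DM⟩ (PySem.Dict.keys ⟨DM⟩)) (PySem.Dict.mk [], ([] : List Int))).1.items := rfl
  have hB : connectTrajectories_alt DM
      = (((List.range DM.length).foldl (pvStepB DM (pvSigs DM) (pvByStart DM) (pvByEnd DM))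
          (PySem.Dict.mk [], PySem.Set.empty))).1.items := rfl
  rw [hA, hB, pvMain DM hpre.1]
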